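-- pv_equiv track=rewrite | github.com/harshu3008/picocalc-sd-formatter | validation.py | format_validation_results
-- ===== SOURCE A (Python) =====
-- from typing import List, Dict, Tuple, Optional
--
-- def format_validation_results(results: Dict[str, Tuple[bool, str]]) -> str:
--     """Format validation results for display"""
--     output = ["=== Pre-Flash Validation Results ===\n"]
--
--     # Define check descriptions and categories
--     check_info = {
--         "device": {
--             "title": "Device Selection",
--             "category": "Required"
--         },
--         "partition_sequence": {
--             "title": "Partition Plan",
--             "category": "Required"
--         },
--         "formatting": {
--             "title": "Format Tools",
--             "category": "Required"
--         },
--         "alignment": {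
--             "title": "Partition Alignment",
--             "category": "Pending",
--             "pending_ok": True
--         },
--         "flash_parameters": {
--             "title": "Flash Parameters",
--             "category": "Optional"
--         },
--         "dd_write": {
--             "title": "Write Access",
--             "category": "Required"
--         },
--         "checksum": {
--             "title": "Data Verification",
--             "category": "Post-Flash",
--             "pending_ok": True
--         }
--     }
--
--     # Group results by category
--     categories = {"Required": [], "Optional": [], "Pending": [], "Post-Flash": []}
--
--     for check, (success, message) in results.items():
--         info = check_info.get(check, {"title": check, "category": "Optional"})
--
--         # Determine status symbol and color indicator
--         if info.get("pending_ok") and "not performed" in message.lower():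
--             status = "⏳"  # Pending
--             status_msg = "PENDING"
--         else:
--             status = "✓" if success else "✗"
--             status_msg = "PASS" if success else "FAIL"
--
--         # Format the result line with title and detailed message
--         line = f"{status} {info['title']}: [{status_msg}]\n"
--         line += f"   → {message}"
--
--         # Add to appropriate category
--         categories[info["category"]].append(line)
--
--     # Add each category to output
--     for category in ["Required", "Optional", "Pending", "Post-Flash"]:
--         if categories[category]:
--             output.append(f"\n{category} Checks:")
--             output.extend(categories[category])
--
--     # Add summary
--     required_failed = any(not success for check, (success, _) in results.items()
--                         if check_info.get(check, {}).get("category") == "Required"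
--                         and not check_info.get(check, {}).get("pending_ok", False))
--
--     output.append("\n=== Summary ===")
--     if required_failed:
--         output.append("❌ Some required checks failed. Please fix these issues before proceeding.")
--     else:
--         output.append("✅ All required checks passed. You may proceed with flashing.")
--         if any(not success for success, _ in results.values()):
--             output.append("   Note: Some non-critical checks are pending or will be performed after flashing.")
--
--     return "\n".join(output)
-- ===== SOURCE B (Python) =====
-- CHECK_INFO = {
--     "device": ("Device Selection", "Required", False),
--     "partition_sequence": ("Partition Plan", "Required", False),
--     "formatting": ("Format Tools", "Required", False),
--     "alignment": ("Partition Alignment", "Pending", True),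
--     "flash_parameters": ("Flash Parameters", "Optional", False),
--     "dd_write": ("Write Access", "Required", False),
--     "checksum": ("Data Verification", "Post-Flash", True),
-- }
--
-- CATEGORY_RANK = {"Required": 0, "Optional": 1, "Pending": 2, "Post-Flash": 3}
-- CATEGORY_NAMES = ("Required", "Optional", "Pending", "Post-Flash")
--
--
-- def _render(check, success, message):
--     """One check -> (category rank, display line, failed?, critical failure?)."""
--     title, category, pending_ok = CHECK_INFO.get(check, (check, "Optional", False))
--     if pending_ok and "not performed" in message.lower():
--         symbol, word = "⏳", "PENDING"
--     elif success:
--         symbol, word = "✓", "PASS"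
--     else:
--         symbol, word = "✗", "FAIL"
--     return (CATEGORY_RANK[category],
--             f"{symbol} {title}: [{word}]\n   → {message}",
--             not success,
--             not success and category == "Required" and not pending_ok)
--
--
-- def format_validation_results(results):
--     """Format validation results for display.
--
--     Stable-sorts the rendered checks by category rank, then emits the grouped
--     report in one scan, inserting a section header whenever the rank changes.
--     """
--     entries = sorted((_render(c, s, m) for c, (s, m) in results.items()),
--                      key=lambda e: e[0])
--     parts = ["=== Pre-Flash Validation Results ===\n"]
--     prev = -1
--     for rank, line, _, _ in entries:
--         if rank != prev:
--             parts.append(f"\n{CATEGORY_NAMES[rank]} Checks:")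
--             prev = rank
--         parts.append(line)
--     parts.append("\n=== Summary ===")
--     if any(e[3] for e in entries):
--         parts.append("❌ Some required checks failed. Please fix these issues before proceeding.")
--     else:
--         parts.append("✅ All required checks passed. You may proceed with flashing.")
--         if any(e[2] for e in entries):
--             parts.append("   Note: Some non-critical checks are pending or will be performed after flashing.")
--     return "\n".join(parts)
-- ===== Notes on version B (the rewrite author's own statement) =====
-- stated objective: alternative
-- what changed: B renders each check to a (category-rank, line, failure-flag) record, stable-sorts the records by rank, and emits the whole grouped report in one scan that inserts a section header whenever the rank changes, instead of A's bucket dict per category plus two separate any() rescans of results.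
import Mathlib
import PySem

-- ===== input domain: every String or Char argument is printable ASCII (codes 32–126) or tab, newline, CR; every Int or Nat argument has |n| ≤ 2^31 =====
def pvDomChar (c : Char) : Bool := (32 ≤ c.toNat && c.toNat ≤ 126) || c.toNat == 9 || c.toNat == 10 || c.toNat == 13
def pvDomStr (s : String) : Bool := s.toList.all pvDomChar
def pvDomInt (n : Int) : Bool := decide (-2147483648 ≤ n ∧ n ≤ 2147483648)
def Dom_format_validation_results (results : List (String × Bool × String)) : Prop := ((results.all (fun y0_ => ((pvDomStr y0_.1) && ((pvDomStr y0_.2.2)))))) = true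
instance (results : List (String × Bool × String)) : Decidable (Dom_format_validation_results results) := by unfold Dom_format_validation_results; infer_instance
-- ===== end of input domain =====

-- B stable-sorts rendered (rank, line, flags) records by category rank and emits the grouped
-- report in one header-on-rank-change scan, replacing A's category bucket dict and any() rescans
-- (objective: alternative, same cost).


-- ===== PORT A =====
-- A's check_info dict: key ↦ (title, category, pending_ok); absent "pending_ok" = false
def fvrA_check_info (check : String) : Option (String × String × Bool) :=
  if check == "device" then some ("Device Selection", "Required", false)
  else if check == "partition_sequence" then some ("Partition Plan", "Required", false)
  else if check == "formatting" then some ("Format Tools", "Required", false)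
  else if check == "alignment" then some ("Partition Alignment", "Pending", true)
  else if check == "flash_parameters" then some ("Flash Parameters", "Optional", false)
  else if check == "dd_write" then some ("Write Access", "Required", false)
  else if check == "checksum" then some ("Data Verification", "Post-Flash", true)
  else none

def format_validation_results (results : List (String × Bool × String)) : String :=
  let output : List String := ["=== Pre-Flash Validation Results ===\n"]
  let categories : PySem.Dict String (List String) :=
    PySem.Dict.ofList [("Required", []), ("Optional", []), ("Pending", []), ("Post-Flash", [])]
  let categories := results.foldl (fun cats r =>
    let info := (fvrA_check_info r.1).getD (r.1, "Optional", false)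
    let sp : String × String :=
      if info.2.2 && PySem.Str.isIn "not performed" (PySem.Str.lower r.2.2) then ("⏳", "PENDING")
      else ((if r.2.1 then "✓" else "✗"), (if r.2.1 then "PASS" else "FAIL"))
    let line := sp.1 ++ " " ++ info.1 ++ ": [" ++ sp.2 ++ "]\n" ++ "   → " ++ r.2.2
    cats.modify info.2.1 [] (fun l => l ++ [line])) categories
  let output := ["Required", "Optional", "Pending", "Post-Flash"].foldl (fun out category =>
    if categories.getD category [] ≠ [] then
      (out ++ ["\n" ++ category ++ " Checks:"]) ++ categories.getD category []
    else out) output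
  let required_failed := results.any (fun r =>
    (match fvrA_check_info r.1 with
     | some info => info.2.1 == "Required" && !info.2.2
     | none => false) && !r.2.1)
  let output := output ++ ["\n=== Summary ==="]
  let output :=
    if required_failed then
      output ++ ["❌ Some required checks failed. Please fix these issues before proceeding."]
    else
      let output := output ++ ["✅ All required checks passed. You may proceed with flashing."]
      if results.any (fun r => !r.2.1) then
        output ++ ["   Note: Some non-critical checks are pending or will be performed after flashing."]
      else output
  PySem.Str.join "\n" output

-- ===== PORT B =====
-- B's CHECK_INFO.get(check, (check, "Optional", False))
def fvrB_check_info (check : String) : String × String × Bool :=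
  if check == "device" then ("Device Selection", "Required", false)
  else if check == "partition_sequence" then ("Partition Plan", "Required", false)
  else if check == "formatting" then ("Format Tools", "Required", false)
  else if check == "alignment" then ("Partition Alignment", "Pending", true)
  else if check == "flash_parameters" then ("Flash Parameters", "Optional", false)
  else if check == "dd_write" then ("Write Access", "Required", false)
  else if check == "checksum" then ("Data Verification", "Post-Flash", true)
  else (check, "Optional", false)

-- B's CATEGORY_RANK[category]; every category produced by CHECK_INFO is one of the four keys
def fvrRank (category : String) : Int :=
  if category == "Required" then 0
  else if category == "Optional" then 1
  else if category == "Pending" then 2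
  else 3

-- B's CATEGORY_NAMES[rank]; exact for the ranks 0,1,2,3 that B produces
def fvrCatName (rank : Int) : String :=
  if rank == 0 then "Required"
  else if rank == 1 then "Optional"
  else if rank == 2 then "Pending"
  else "Post-Flash"

-- B's _render: one check ↦ (rank, line, failed?, critical failure?)
def fvrB_render (check : String) (success : Bool) (message : String) :
    Int × String × Bool × Bool :=
  let info := fvrB_check_info check
  let sw : String × String :=
    if info.2.2 && PySem.Str.isIn "not performed" (PySem.Str.lower message) then ("⏳", "PENDING")
    else if success then ("✓", "PASS")
    else ("✗", "FAIL")
  (fvrRank info.2.1,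
   sw.1 ++ " " ++ info.1 ++ ": [" ++ sw.2 ++ "]\n" ++ "   → " ++ message,
   !success,
   !success && info.2.1 == "Required" && !info.2.2)

def format_validation_results_alt (results : List (String × Bool × String)) : String :=
  let entries :=
    PySem.List.sorted (results.map (fun r => fvrB_render r.1 r.2.1 r.2.2)) (fun e => e.1)
  let parts : List String := ["=== Pre-Flash Validation Results ===\n"]
  -- for rank, line, _, _ in entries: header when rank ≠ prev, then the line
  let st := entries.foldl (fun (st : List String × Int) e =>
    let st := if e.1 ≠ st.2 then (st.1 ++ ["\n" ++ fvrCatName e.1 ++ " Checks:"], e.1) else st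
    (st.1 ++ [e.2.1], st.2)) (parts, -1)
  let parts := st.1 ++ ["\n=== Summary ==="]
  let parts :=
    if entries.any (fun e => e.2.2.2) then
      parts ++ ["❌ Some required checks failed. Please fix these issues before proceeding."]
    else
      let parts := parts ++ ["✅ All required checks passed. You may proceed with flashing."]
      if entries.any (fun e => e.2.2.1) then
        parts ++ ["   Note: Some non-critical checks are pending or will be performed after flashing."]
      else parts
  PySem.Str.join "\n" parts

-- ===== PRECONDITION & SPEC =====
def Spec_format_validation_results (results : List (String × Bool × String)) (out : String) : Prop := out = format_validation_results_alt results
instance (results : List (String × Bool × String)) (out : String) : Decidable (Spec_format_validation_results results out) := by unfold Spec_format_validation_results; infer_instance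

-- ===== CLAIM (what is proved, stated in full; the proofs are below) =====
def Claim_equal_format_validation_results : Prop := ∀ (results : List (String × Bool × String)), Dom_format_validation_results results → Spec_format_validation_results results (format_validation_results results)


-- the (category, line) pair both programs compute for one entry
def pvTag (r : String × Bool × String) : String × String :=
  let info := fvrB_check_info r.1
  let sw : String × String :=
    if info.2.2 && PySem.Str.isIn "not performed" (PySem.Str.lower r.2.2) then ("⏳", "PENDING")
    else ((if r.2.1 then "✓" else "✗"), (if r.2.1 then "PASS" else "FAIL"))
  (info.2.1, sw.1 ++ " " ++ info.1 ++ ": [" ++ sw.2 ++ "]\n" ++ "   → " ++ r.2.2)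

-- the predicate of A's required_failed scan
def pvReq (r : String × Bool × String) : Bool :=
  (match fvrA_check_info r.1 with
   | some info => info.2.1 == "Required" && !info.2.2
   | none => false) && !r.2.1

-- named copies of the fold bodies occurring inline in the ports
def pvStepA (cats : PySem.Dict String (List String)) (r : String × Bool × String) :
    PySem.Dict String (List String) :=
  let info := (fvrA_check_info r.1).getD (r.1, "Optional", false)
  let sp : String × String :=
    if info.2.2 && PySem.Str.isIn "not performed" (PySem.Str.lower r.2.2) then ("⏳", "PENDING")
    else ((if r.2.1 then "✓" else "✗"), (if r.2.1 then "PASS" else "FAIL"))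
  let line := sp.1 ++ " " ++ info.1 ++ ": [" ++ sp.2 ++ "]\n" ++ "   → " ++ r.2.2
  cats.modify info.2.1 [] (fun l => l ++ [line])

def pvScanStep (st : List String × Int) (e : Int × String × Bool × Bool) :
    List String × Int :=
  let st := if e.1 ≠ st.2 then (st.1 ++ ["\n" ++ fvrCatName e.1 ++ " Checks:"], e.1) else st
  (st.1 ++ [e.2.1], st.2)

def pvRend (r : String × Bool × String) : Int × String × Bool × Bool :=
  fvrB_render r.1 r.2.1 r.2.2

def pvF (i : Int) (l : List (Int × String × Bool × Bool)) : List (Int × String × Bool × Bool) :=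
  l.filter (fun e => e.1 == i)

def pvSec (r : Int) (f : List (Int × String × Bool × Bool)) : List String :=
  if f = [] then [] else ("\n" ++ fvrCatName r ++ " Checks:") :: f.map (fun e => e.2.1)

theorem fvrB_eq_getD (c : String) :
    fvrB_check_info c = (fvrA_check_info c).getD (c, "Optional", false) := by
  unfold fvrA_check_info fvrB_check_info
  split_ifs <;> rfl

theorem pvReq_eq (r : String × Bool × String) :
    pvReq r = (((fvrB_check_info r.1).2.1 == "Required" && !(fvrB_check_info r.1).2.2) && !r.2.1) := by
  unfold pvReq
  rw [fvrB_eq_getD]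
  cases h : fvrA_check_info r.1 with
  | none => simp
  | some v => rfl

theorem pvStepA_eq (cats : PySem.Dict String (List String)) (r : String × Bool × String) :
    pvStepA cats r = cats.modify (pvTag r).1 [] (fun l => l ++ [(pvTag r).2]) := by
  simp only [pvStepA, pvTag, fvrB_eq_getD]

theorem pvRend_eq (r : String × Bool × String) :
    pvRend r = (fvrRank (pvTag r).1, (pvTag r).2, !r.2.1, pvReq r) := by
  simp only [pvRend, fvrB_render, pvTag, pvReq_eq]
  by_cases h : (fvrB_check_info r.1).2.2
      && PySem.Str.isIn "not performed" (PySem.Str.lower r.2.2) <;>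
    cases hs : r.2.1 <;>
    cases hc : ((fvrB_check_info r.1).2.1 == "Required") <;>
    cases hp : (fvrB_check_info r.1).2.2 <;>
    simp_all

theorem foldA_getD (l : List (String × Bool × String)) (c : String)
    (d : PySem.Dict String (List String)) :
    (l.foldl pvStepA d).getD c []
      = d.getD c [] ++ ((l.map pvTag).filter (fun p => p.1 == c)).map (·.2) := by
  induction l generalizing d with
  | nil => simp
  | cons x l ih =>
    rw [List.foldl_cons, pvStepA_eq, ih, PySem.Dict.getD_modify, List.map_cons, List.filter_cons]
    by_cases hc : c = (pvTag x).1
    · simp [hc, List.append_assoc]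
    · have : ((pvTag x).1 == c) = false := by simp [Ne.symm hc]
      simp [hc, this]

theorem cat_mem (c : String) :
    (fvrB_check_info c).2.1 = "Required" ∨ (fvrB_check_info c).2.1 = "Optional" ∨
    (fvrB_check_info c).2.1 = "Pending" ∨ (fvrB_check_info c).2.1 = "Post-Flash" := by
  unfold fvrB_check_info
  split_ifs <;> simp

theorem rank_mem (r : String × Bool × String) :
    (pvRend r).1 = 0 ∨ (pvRend r).1 = 1 ∨ (pvRend r).1 = 2 ∨ (pvRend r).1 = 3 := by
  rw [pvRend_eq]
  have h := cat_mem r.1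
  have : (pvTag r).1 = (fvrB_check_info r.1).2.1 := rfl
  rw [this]
  rcases h with h | h | h | h <;> rw [h] <;> simp [fvrRank]

-- rank i ↔ category name, for categories coming from the table
theorem rank_eq_iff (r : String × Bool × String) (i : Int) (n : String)
    (hn : (i = 0 ∧ n = "Required") ∨ (i = 1 ∧ n = "Optional") ∨
          (i = 2 ∧ n = "Pending") ∨ (i = 3 ∧ n = "Post-Flash")) :
    ((pvRend r).1 == i) = ((pvTag r).1 == n) := by
  rw [pvRend_eq]
  have ht : (pvTag r).1 = (fvrB_check_info r.1).2.1 := rfl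
  rw [ht]
  rcases cat_mem r.1 with h | h | h | h <;> rw [h] <;>
    rcases hn with ⟨hi, hN⟩ | ⟨hi, hN⟩ | ⟨hi, hN⟩ | ⟨hi, hN⟩ <;> subst hi <;> subst hN <;>
    simp [fvrRank]

-- ---- stable sort by rank = concatenation of the rank blocks ----

theorem insert_skip {α : Type} (before : α → α → Bool) (x : α) (a b : List α)
    (h : ∀ y ∈ a, before x y = false) :
    PySem.List.insertBy before x (a ++ b) = a ++ PySem.List.insertBy before x b := by
  induction a with
  | nil => rfl
  | cons y t ih =>
    have hy : before x y = false := h y (by simp)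
    have ih' := ih (fun z hz => h z (by simp [hz]))
    simp [PySem.List.insertBy, hy, ih']

theorem insert_front {α : Type} (before : α → α → Bool) (x : α) (c : List α)
    (h : ∀ y ∈ c, before x y = true) :
    PySem.List.insertBy before x c = x :: c := by
  cases c with
  | nil => rfl
  | cons y t => simp [PySem.List.insertBy, h y (by simp)]

theorem mem_pvF (i : Int) (l : List (Int × String × Bool × Bool)) (e : Int × String × Bool × Bool)
    (he : e ∈ pvF i l) : e.1 = i := by
  have := List.of_mem_filter he
  simpa using this

theorem sorted_blocks (l : List (Int × String × Bool × Bool))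
    (hl : ∀ e ∈ l, e.1 = 0 ∨ e.1 = 1 ∨ e.1 = 2 ∨ e.1 = 3) :
    PySem.List.sorted l (fun e => e.1)
      = pvF 0 l ++ (pvF 1 l ++ (pvF 2 l ++ pvF 3 l)) := by
  rw [PySem.List.sorted_eq_foldl_insertBy]
  induction l using List.reverseRecOn with
  | nil => rfl
  | append_singleton t x ih =>
    have hx := hl x (by simp)
    have ht : ∀ e ∈ t, e.1 = 0 ∨ e.1 = 1 ∨ e.1 = 2 ∨ e.1 = 3 :=
      fun e he => hl e (by simp [he])
    rw [List.foldl_append, List.foldl_cons, List.foldl_nil, ih ht]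
    have hF : ∀ i : Int, pvF i (t ++ [x]) = pvF i t ++ (if x.1 == i then [x] else []) := by
      intro i; simp [pvF, List.filter_append, List.filter_cons]
    rcases hx with hx | hx | hx | hx
    · -- x.1 = 0 : skip block 0, insert in front of blocks 1,2,3
      rw [insert_skip _ x (pvF 0 t) _
            (fun y hy => by rw [mem_pvF 0 t y hy]; simp [hx]),
          insert_front _ x _ (fun y hy => by
            rcases List.mem_append.mp hy with h | h
            · rw [mem_pvF 1 t y h]; simp [hx]
            rcases List.mem_append.mp h with h | h
            · rw [mem_pvF 2 t y h]; simp [hx]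
            · rw [mem_pvF 3 t y h]; simp [hx]),
          hF 0, hF 1, hF 2, hF 3]
      simp [hx]
    · -- x.1 = 1
      rw [insert_skip _ x (pvF 0 t) _
            (fun y hy => by rw [mem_pvF 0 t y hy]; simp [hx]),
          insert_skip _ x (pvF 1 t) _
            (fun y hy => by rw [mem_pvF 1 t y hy]; simp [hx]),
          insert_front _ x _ (fun y hy => by
            rcases List.mem_append.mp hy with h | h
            · rw [mem_pvF 2 t y h]; simp [hx]
            · rw [mem_pvF 3 t y h]; simp [hx]),
          hF 0, hF 1, hF 2, hF 3]
      simp [hx]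
    · -- x.1 = 2
      rw [insert_skip _ x (pvF 0 t) _
            (fun y hy => by rw [mem_pvF 0 t y hy]; simp [hx]),
          insert_skip _ x (pvF 1 t) _
            (fun y hy => by rw [mem_pvF 1 t y hy]; simp [hx]),
          insert_skip _ x (pvF 2 t) _
            (fun y hy => by rw [mem_pvF 2 t y hy]; simp [hx]),
          insert_front _ x _ (fun y hy => by rw [mem_pvF 3 t y hy]; simp [hx]),
          hF 0, hF 1, hF 2, hF 3]
      simp [hx]
    · -- x.1 = 3 : x goes to the very end
      rw [PySem.List.insertBy_of_forall_not_before _ x _ (fun y hy => by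
            rcases List.mem_append.mp hy with h | h
            · rw [mem_pvF 0 t y h]; simp [hx]
            rcases List.mem_append.mp h with h | h
            · rw [mem_pvF 1 t y h]; simp [hx]
            rcases List.mem_append.mp h with h | h
            · rw [mem_pvF 2 t y h]; simp [hx]
            · rw [mem_pvF 3 t y h]; simp [hx]),
          hF 0, hF 1, hF 2, hF 3]
      simp [hx]

-- ---- the header-on-rank-change scan over rank blocks ----

theorem scanBlock (r : Int) (f : List (Int × String × Bool × Bool))
    (hf : ∀ e ∈ f, e.1 = r) (parts : List String) (p : Int) (hp : p ≠ r) :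
    f.foldl pvScanStep (parts, p) = (parts ++ pvSec r f, if f = [] then p else r) := by
  cases f with
  | nil => simp [pvSec]
  | cons x t =>
    have hx : x.1 = r := hf x (by simp)
    have step : pvScanStep (parts, p) x
        = (parts ++ [("\n" ++ fvrCatName r ++ " Checks:"), x.2.1], r) := by
      simp [pvScanStep, hx, Ne.symm hp]
    rw [List.foldl_cons, step]
    -- remaining elements share the prev rank: no more headers in this block
    have same : ∀ (t' : List (Int × String × Bool × Bool)) (ps : List String),
        (∀ e ∈ t', e.1 = r) →
        t'.foldl pvScanStep (ps, r) = (ps ++ t'.map (fun e => e.2.1), r) := by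
      intro t'
      induction t' with
      | nil => intro ps _; simp
      | cons y u ih =>
        intro ps h
        have hy : y.1 = r := h y (by simp)
        have : pvScanStep (ps, r) y = (ps ++ [y.2.1], r) := by simp [pvScanStep, hy]
        rw [List.foldl_cons, this, ih _ (fun e he => h e (by simp [he]))]
        simp
    rw [same t _ (fun e he => hf e (by simp [he]))]
    simp [pvSec, List.append_assoc]

theorem scanAll (b0 b1 b2 b3 : List (Int × String × Bool × Bool))
    (h0 : ∀ e ∈ b0, e.1 = 0) (h1 : ∀ e ∈ b1, e.1 = 1)
    (h2 : ∀ e ∈ b2, e.1 = 2) (h3 : ∀ e ∈ b3, e.1 = 3) (parts : List String) :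
    ((b0 ++ (b1 ++ (b2 ++ b3))).foldl pvScanStep (parts, -1)).1
      = parts ++ (pvSec 0 b0 ++ (pvSec 1 b1 ++ (pvSec 2 b2 ++ pvSec 3 b3))) := by
  rw [List.foldl_append, List.foldl_append, List.foldl_append]
  rw [scanBlock 0 b0 h0 parts (-1) (by decide)]
  by_cases e0 : b0 = [] <;> simp only [e0, if_true, if_false] <;>
  · rw [scanBlock 1 b1 h1 _ _ (by decide)]
    by_cases e1 : b1 = [] <;> simp only [e1, if_true, if_false] <;>
    · rw [scanBlock 2 b2 h2 _ _ (by decide)]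
      by_cases e2 : b2 = [] <;> simp only [e2, if_true, if_false] <;>
      · rw [scanBlock 3 b3 h3 _ _ (by decide)]
        simp [List.append_assoc]

-- A's category-output loop body, with g = the per-category line lookup
def pvStepOut (g : String → List String) (out : List String) (c : String) : List String :=
  if g c ≠ [] then (out ++ ["\n" ++ c ++ " Checks:"]) ++ g c else out

theorem foldOut (g : String → List String) (o : List String) (cats : List String) :
    cats.foldl (pvStepOut g) o
      = o ++ cats.flatMap (fun c => if g c = [] then [] else ("\n" ++ c ++ " Checks:") :: g c) := by
  induction cats generalizing o with
  | nil => simp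
  | cons c cs ih =>
    rw [List.foldl_cons, ih]
    by_cases hc : g c = [] <;> simp [pvStepOut, hc, List.append_assoc]

theorem sec_eq (l : List (String × Bool × String)) (i : Int) (n : String)
    (hn : (i = 0 ∧ n = "Required") ∨ (i = 1 ∧ n = "Optional") ∨
          (i = 2 ∧ n = "Pending") ∨ (i = 3 ∧ n = "Post-Flash")) :
    pvSec i (pvF i (l.map pvRend))
      = (if ((l.map pvTag).filter (fun p => p.1 == n)).map (·.2) = [] then []
         else ("\n" ++ n ++ " Checks:") :: ((l.map pvTag).filter (fun p => p.1 == n)).map (·.2)) := by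
  have hq : ((fun e : Int × String × Bool × Bool => e.1 == i) ∘ pvRend)
      = fun r => ((pvTag r).1 == n) := by
    funext r; exact rank_eq_iff r i n hn
  have hmap : ((fun e : Int × String × Bool × Bool => e.2.1) ∘ pvRend)
      = fun r => (pvTag r).2 := by
    funext r; rw [Function.comp_apply, pvRend_eq]
  have hname : fvrCatName i = n := by
    rcases hn with ⟨hi, hN⟩ | ⟨hi, hN⟩ | ⟨hi, hN⟩ | ⟨hi, hN⟩ <;> subst hi <;> subst hN <;> rfl
  have h1 : pvF i (l.map pvRend) = List.map pvRend (List.filter (fun r => (pvTag r).1 == n) l) := by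
    simp only [pvF, List.filter_map, hq]
  rw [pvSec.eq_def, h1, hname]
  simp only [List.filter_map, List.map_map, hmap, List.map_eq_nil_iff, Function.comp_def]

theorem flags_req (l : List (String × Bool × String)) :
    (PySem.List.sorted (l.map pvRend) (fun e => e.1)).any (fun e => e.2.2.2) = l.any pvReq := by
  have hf : ((fun e : Int × String × Bool × Bool => e.2.2.2) ∘ pvRend) = pvReq := by
    funext r; rw [Function.comp_apply, pvRend_eq]
  rw [List.Perm.any_eq (PySem.List.sorted_perm (l.map pvRend) (fun e => e.1) false),
      List.any_map, hf]

theorem flags_any (l : List (String × Bool × String)) :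
    (PySem.List.sorted (l.map pvRend) (fun e => e.1)).any (fun e => e.2.2.1)
      = l.any (fun r => !r.2.1) := by
  have hf : ((fun e : Int × String × Bool × Bool => e.2.2.1) ∘ pvRend)
      = fun r => !r.2.1 := by
    funext r; rw [Function.comp_apply, pvRend_eq]
  rw [List.Perm.any_eq (PySem.List.sorted_perm (l.map pvRend) (fun e => e.1) false),
      List.any_map, hf]

theorem rank_mem_map (l : List (String × Bool × String)) :
    ∀ e ∈ l.map pvRend, e.1 = 0 ∨ e.1 = 1 ∨ e.1 = 2 ∨ e.1 = 3 := by
  intro e he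
  obtain ⟨r, _, rfl⟩ := List.mem_map.mp he
  exact rank_mem r

-- ===== VERDICT (by name: the statement is the Claim_ definition above) =====
theorem format_validation_results_spec : Claim_equal_format_validation_results := by
  intro results _
  unfold Spec_format_validation_results format_validation_results format_validation_results_alt
  rw [show (fun (cats : PySem.Dict String (List String)) (r : String × Bool × String) =>
    let info := (fvrA_check_info r.1).getD (r.1, "Optional", false)
    let sp : String × String :=
      if info.2.2 && PySem.Str.isIn "not performed" (PySem.Str.lower r.2.2) then ("⏳", "PENDING")
      else ((if r.2.1 then "✓" else "✗"), (if r.2.1 then "PASS" else "FAIL"))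
    let line := sp.1 ++ " " ++ info.1 ++ ": [" ++ sp.2 ++ "]\n" ++ "   → " ++ r.2.2
    cats.modify info.2.1 [] (fun l => l ++ [line])) = pvStepA from rfl]
  rw [show (fun (r : String × Bool × String) =>
    (match fvrA_check_info r.1 with
     | some info => info.2.1 == "Required" && !info.2.2
     | none => false) && !r.2.1) = pvReq from rfl]
  rw [show (fun (r : String × Bool × String) => fvrB_render r.1 r.2.1 r.2.2) = pvRend from rfl]
  rw [show (fun (st : List String × Int) (e : Int × String × Bool × Bool) =>
    let st := if e.1 ≠ st.2 then (st.1 ++ ["\n" ++ fvrCatName e.1 ++ " Checks:"], e.1) else st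
    (st.1 ++ [e.2.1], st.2)) = pvScanStep from rfl]
  simp only [flags_req, flags_any]
  rw [show (fun (out : List String) (category : String) =>
    if (results.foldl pvStepA (PySem.Dict.ofList
        [("Required", ([] : List String)), ("Optional", []), ("Pending", []), ("Post-Flash", [])])).getD category [] ≠ [] then
      (out ++ ["\n" ++ category ++ " Checks:"]) ++ (results.foldl pvStepA (PySem.Dict.ofList
        [("Required", ([] : List String)), ("Optional", []), ("Pending", []), ("Post-Flash", [])])).getD category []
    else out) = pvStepOut (fun c => (results.foldl pvStepA (PySem.Dict.ofList
        [("Required", ([] : List String)), ("Optional", []), ("Pending", []), ("Post-Flash", [])])).getD c []) from rfl]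
  rw [foldOut, sorted_blocks (results.map pvRend) (rank_mem_map results),
      scanAll (pvF 0 (results.map pvRend)) (pvF 1 (results.map pvRend))
        (pvF 2 (results.map pvRend)) (pvF 3 (results.map pvRend))
        (mem_pvF 0 _) (mem_pvF 1 _) (mem_pvF 2 _) (mem_pvF 3 _)]
  rw [sec_eq results 0 "Required" (Or.inl ⟨rfl, rfl⟩),
      sec_eq results 1 "Optional" (Or.inr (Or.inl ⟨rfl, rfl⟩)),
      sec_eq results 2 "Pending" (Or.inr (Or.inr (Or.inl ⟨rfl, rfl⟩))),
      sec_eq results 3 "Post-Flash" (Or.inr (Or.inr (Or.inr ⟨rfl, rfl⟩)))]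
  have hR : (PySem.Dict.ofList [("Required", ([] : List String)), ("Optional", []),
      ("Pending", []), ("Post-Flash", [])]).getD "Required" [] = [] := rfl
  have hO : (PySem.Dict.ofList [("Required", ([] : List String)), ("Optional", []),
      ("Pending", []), ("Post-Flash", [])]).getD "Optional" [] = [] := rfl
  have hP : (PySem.Dict.ofList [("Required", ([] : List String)), ("Optional", []),
      ("Pending", []), ("Post-Flash", [])]).getD "Pending" [] = [] := rfl
  have hF : (PySem.Dict.ofList [("Required", ([] : List String)), ("Optional", []),
      ("Pending", []), ("Post-Flash", [])]).getD "Post-Flash" [] = [] := rfl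
  simp only [List.flatMap, List.map, foldA_getD, hR, hO, hP, hF, List.nil_append, List.flatten]
  congr 1
  by_cases h1 : results.any pvReq <;> by_cases h2 : results.any (fun r => !r.2.1) <;>
    simp [h1, h2, List.append_assoc]
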